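-- pv_equiv track=rewrite | github.com/tomekrzymyszkiewicz/advent-of-code-2023 | day07/task2.py | compare_hands_by_cards
-- ===== SOURCE A (Python) =====
-- def get_card_value(card: str) -> int:
--     values = "AKQT98765432J"
--     if card in values:
--         return values.index(card)
--     else:
--         return -1
--
-- def compare_hands_by_cards(first_hand: str, second_hand: str) -> bool:
--     for first_hand_card, second_hand_card in zip(first_hand, second_hand):
--         first_hand_card_value = get_card_value(first_hand_card)
--         second_hand_card_value = get_card_value(second_hand_card)
--         if first_hand_card_value < second_hand_card_value:
--             return 1
--         elif first_hand_card_value > second_hand_card_value: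
--             return -1
--     return 0
-- ===== SOURCE B (Python) =====
-- def get_card_value(card: str) -> int:
--     values = "AKQT98765432J"
--     if card in values:
--         return values.index(card)
--     else:
--         return -1
--
-- def compare_hands_by_cards(first_hand: str, second_hand: str) -> bool:
--     # map both hands to value lists, truncate to the common length (zip's rule),
--     # then use Python's lexicographic list comparison
--     n = min(len(first_hand), len(second_hand))
--     va = [get_card_value(c) for c in first_hand[:n]]
--     vb = [get_card_value(c) for c in second_hand[:n]]
--     return (va < vb) - (va > vb)
-- ===== Notes on version B (the rewrite author's own statement) =====
-- stated objective: idiomatic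
-- what changed: replaces the explicit zip loop with early returns by mapping both hands to value lists truncated to the common length and returning (va < vb) - (va > vb) via Python's built-in lexicographic list comparison
import Mathlib
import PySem

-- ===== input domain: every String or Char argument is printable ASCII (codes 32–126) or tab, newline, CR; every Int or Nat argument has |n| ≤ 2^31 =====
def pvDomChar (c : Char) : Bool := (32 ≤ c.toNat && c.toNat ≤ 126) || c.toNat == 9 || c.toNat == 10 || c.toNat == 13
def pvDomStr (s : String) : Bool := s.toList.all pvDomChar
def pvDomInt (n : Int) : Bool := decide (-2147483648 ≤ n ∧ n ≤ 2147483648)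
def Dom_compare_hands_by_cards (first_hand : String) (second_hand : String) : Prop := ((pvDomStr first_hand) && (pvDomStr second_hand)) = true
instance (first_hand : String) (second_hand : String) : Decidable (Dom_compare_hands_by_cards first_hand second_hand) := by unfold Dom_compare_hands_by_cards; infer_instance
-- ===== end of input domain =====

-- B replaces A's early-return zip loop by comparing the two truncated value lists lexicographically (idiomatic; same cost).

-- shared helper (both Pythons use the identical get_card_value)
def get_card_value (card : Char) : Int :=
  let values := "AKQT98765432J".toList
  if values.contains card then (values.idxOf card : Int) else -1

-- ===== PORT A =====
-- A's for-loop over zip(first_hand, second_hand) with early returns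
def pvLoopA : List (Char × Char) → Int
  | [] => 0
  | (a, b) :: rest =>
      let va := get_card_value a
      let vb := get_card_value b
      if va < vb then 1
      else if va > vb then -1
      else pvLoopA rest

def compare_hands_by_cards (first_hand : String) (second_hand : String) : Int :=
  pvLoopA (first_hand.toList.zip second_hand.toList)

-- ===== PORT B =====
-- Python's '<' on lists of ints (lexicographic, shorter prefix is smaller)
def pvListLt : List Int → List Int → Bool
  | [], [] => false
  | [], _ :: _ => true
  | _ :: _, [] => false
  | a :: as, b :: bs => if a < b then true else if b < a then false else pvListLt as bs

def compare_hands_by_cards_alt (first_hand : String) (second_hand : String) : Int :=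
  let n := min first_hand.toList.length second_hand.toList.length
  let va := (first_hand.toList.take n).map get_card_value
  let vb := (second_hand.toList.take n).map get_card_value
  (if pvListLt va vb then (1 : Int) else 0) - (if pvListLt vb va then (1 : Int) else 0)

-- ===== PRECONDITION & SPEC =====
def Spec_compare_hands_by_cards (first_hand : String) (second_hand : String) (out : Int) : Prop := out = compare_hands_by_cards_alt first_hand second_hand
instance (first_hand : String) (second_hand : String) (out : Int) : Decidable (Spec_compare_hands_by_cards first_hand second_hand out) := by unfold Spec_compare_hands_by_cards; infer_instance

-- ===== CLAIM (what is proved, stated in full; the proofs are below) =====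
def Claim_equal_compare_hands_by_cards : Prop := ∀ (first_hand : String) (second_hand : String), Dom_compare_hands_by_cards first_hand second_hand → Spec_compare_hands_by_cards first_hand second_hand (compare_hands_by_cards first_hand second_hand)

-- ===== LEMMAS AND PROOFS =====
theorem pvLoop_eq (xs : List Char) : ∀ (ys : List Char),
    pvLoopA (xs.zip ys) =
      (if pvListLt ((xs.take (min xs.length ys.length)).map get_card_value)
                   ((ys.take (min xs.length ys.length)).map get_card_value) then (1 : Int) else 0)
      - (if pvListLt ((ys.take (min xs.length ys.length)).map get_card_value)
                     ((xs.take (min xs.length ys.length)).map get_card_value) then (1 : Int) else 0) := by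
  induction xs with
  | nil => intro ys; simp [pvLoopA, pvListLt]
  | cons a as ih =>
    intro ys
    cases ys with
    | nil => simp [pvLoopA, pvListLt]
    | cons b bs =>
      have hmin : min (a :: as).length (b :: bs).length = min as.length bs.length + 1 := by
        simp [List.length_cons]
      simp only [List.zip_cons_cons, pvLoopA, hmin, List.take_succ_cons, List.map_cons, pvListLt]
      split_ifs <;> first | omega | (rw [ih bs]; simp_all [List.map_take]) | simp_all

theorem compare_hands_by_cards_spec : Claim_equal_compare_hands_by_cards := by
  intro f s _
  unfold Spec_compare_hands_by_cards compare_hands_by_cards compare_hands_by_cards_alt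
  exact pvLoop_eq f.toList s.toList
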